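-- pv_equiv track=rewrite | github.com/pixelindigo/icekey | icekey/ice.py | ice_perm32
-- ===== SOURCE A (Python) =====
-- ICE_PBOX = [0x00000001, 0x00000080, 0x00000400, 0x00002000,
--             0x00080000, 0x00200000, 0x01000000, 0x40000000,
--             0x00000008, 0x00000020, 0x00000100, 0x00004000,
--             0x00010000, 0x00800000, 0x04000000, 0x20000000,
--             0x00000004, 0x00000010, 0x00000200, 0x00008000,
--             0x00020000, 0x00400000, 0x08000000, 0x10000000,
--             0x00000002, 0x00000040, 0x00000800, 0x00001000,
--             0x00040000, 0x00100000, 0x02000000, 0x80000000]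
--
-- def ice_perm32(x):
--     """Carry out the ICE 32-bit P-box permutation."""
--     res = 0
--     for p in ICE_PBOX:
--         if x == 0:
--             break
--         if x & 1:
--             res |= p
--         x >>= 1
--
--     return res
-- ===== SOURCE B (Python) =====
-- ICE_PBOX = [0x00000001, 0x00000080, 0x00000400, 0x00002000,
--             0x00080000, 0x00200000, 0x01000000, 0x40000000,
--             0x00000008, 0x00000020, 0x00000100, 0x00004000,
--             0x00010000, 0x00800000, 0x04000000, 0x20000000,
--             0x00000004, 0x00000010, 0x00000200, 0x00008000,
--             0x00020000, 0x00400000, 0x08000000, 0x10000000,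
--             0x00000002, 0x00000040, 0x00000800, 0x00001000,
--             0x00040000, 0x00100000, 0x02000000, 0x80000000]
--
-- # Four 256-entry lookup tables: _TABLES[k][b] is the OR of the ICE_PBOX entries
-- # selected by the bits of byte b placed at byte position k. Built once at import.
-- _TABLES = []
-- for _k in range(4):
--     _tbl = []
--     for _b in range(256):
--         _e = 0
--         for _j in range(8):
--             if (_b >> _j) & 1:
--                 _e |= ICE_PBOX[8 * _k + _j]
--         _tbl.append(_e)
--     _TABLES.append(_tbl)
--
--
-- def ice_perm32(x):
--     """Carry out the ICE 32-bit P-box permutation."""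
--     return (_TABLES[0][x & 0xFF]
--             | _TABLES[1][(x >> 8) & 0xFF]
--             | _TABLES[2][(x >> 16) & 0xFF]
--             | _TABLES[3][(x >> 24) & 0xFF])
-- ===== Notes on version B (the rewrite author's own statement) =====
-- stated objective: alternative
-- what changed: Replaces A's per-bit scan over the ICE_PBOX entries (shared constant data) by four precomputed per-byte lookup tables built once at import, so each call does four table lookups and three ORs instead of a thirty-two-step shift/test/OR loop.
import Mathlib
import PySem

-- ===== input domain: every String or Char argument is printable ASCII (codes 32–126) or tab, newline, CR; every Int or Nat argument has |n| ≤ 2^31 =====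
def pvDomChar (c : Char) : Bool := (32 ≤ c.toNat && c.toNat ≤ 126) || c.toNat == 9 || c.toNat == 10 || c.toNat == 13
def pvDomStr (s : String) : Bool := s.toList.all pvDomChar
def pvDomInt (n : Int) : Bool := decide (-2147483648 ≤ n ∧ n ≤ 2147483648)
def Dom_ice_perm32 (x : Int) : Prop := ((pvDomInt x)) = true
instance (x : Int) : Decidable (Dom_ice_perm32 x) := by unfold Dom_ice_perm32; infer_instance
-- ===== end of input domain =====

-- B replaces A's per-bit scan over ICE_PBOX by four precomputed per-byte lookup tables built once at import.

-- ===== PORT A =====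
def PBOX : List Int := [0x00000001, 0x00000080, 0x00000400, 0x00002000,
            0x00080000, 0x00200000, 0x01000000, 0x40000000,
            0x00000008, 0x00000020, 0x00000100, 0x00004000,
            0x00010000, 0x00800000, 0x04000000, 0x20000000,
            0x00000004, 0x00000010, 0x00000200, 0x00008000,
            0x00020000, 0x00400000, 0x08000000, 0x10000000,
            0x00000002, 0x00000040, 0x00000800, 0x00001000,
            0x00040000, 0x00100000, 0x02000000, 0x80000000]

-- Python's 'x >> k' on int is arithmetic shift = floor division by 2^k (exact, negatives included).
def iceLoop : List Int → Int → Int → Int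
  | [], _, res => res
  | p :: ps, x, res =>
    if x = 0 then res
    else iceLoop ps (PySem.Int.floordiv x 2)
        (if PySem.Int.band x 1 ≠ 0 then PySem.Int.bor res p else res)

def ice_perm32 (x : Int) : Int := iceLoop PBOX x 0

-- ===== PORT B =====
-- _TABLES of Source B: table k entry b = OR of the PBOX entries for the set bits of byte b.
def pboxTables : List (List Int) :=
  (List.range 4).map (fun k =>
    (List.range 256).map (fun (b : Nat) =>
      (List.range 8).foldl
        (fun e j =>
          if PySem.Int.band (PySem.Int.floordiv ((b : Nat) : Int) ((2 : Int) ^ j)) 1 ≠ 0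
          then PySem.Int.bor e (PBOX.getD (8 * k + j) 0) else e) 0))

def ice_perm32_alt (x : Int) : Int :=
  PySem.Int.bor (PySem.Int.bor (PySem.Int.bor
      (PySem.List.pyGetD (pboxTables.getD 0 []) (PySem.Int.band x 255) 0)
      (PySem.List.pyGetD (pboxTables.getD 1 []) (PySem.Int.band (PySem.Int.floordiv x 256) 255) 0))
      (PySem.List.pyGetD (pboxTables.getD 2 []) (PySem.Int.band (PySem.Int.floordiv x 65536) 255) 0))
    (PySem.List.pyGetD (pboxTables.getD 3 []) (PySem.Int.band (PySem.Int.floordiv x 16777216) 255) 0)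

-- ===== PRECONDITION & SPEC =====
def Spec_ice_perm32 (x : Int) (out : Int) : Prop := out = ice_perm32_alt x
instance (x : Int) (out : Int) : Decidable (Spec_ice_perm32 x out) := by unfold Spec_ice_perm32; infer_instance

-- ===== CLAIM (what is proved, stated in full; the proofs are below) =====
def Claim_equal_ice_perm32 : Prop := ∀ (x : Int), Dom_ice_perm32 x → Spec_ice_perm32 x (ice_perm32 x)

-- ===== LEMMAS AND PROOFS =====

-- Break-free version of A's loop (the break is only an early exit: once x = 0 nothing changes).
def gLoop : List Int → Int → Int → Int
  | [], _, acc => acc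
  | p :: ps, x, acc =>
    gLoop ps (PySem.Int.floordiv x 2)
      (if PySem.Int.band x 1 ≠ 0 then PySem.Int.bor acc p else acc)

lemma gLoop_zero (l : List Int) (acc : Int) : gLoop l 0 acc = acc := by
  induction l generalizing acc with
  | nil => rfl
  | cons p ps ih => simp [gLoop]; exact ih acc

lemma iceLoop_eq_gLoop (l : List Int) (x acc : Int) : iceLoop l x acc = gLoop l x acc := by
  induction l generalizing x acc with
  | nil => rfl
  | cons p ps ih =>
    by_cases hx : x = 0
    · subst hx; simp [iceLoop, gLoop_zero]
    · simp [iceLoop, gLoop, hx, ih]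

lemma bor_nonneg {a b : Int} (ha : 0 ≤ a) (hb : 0 ≤ b) : 0 ≤ PySem.Int.bor a b := by
  rw [PySem.Int.bor_of_nonneg ha hb]; exact Int.natCast_nonneg _

lemma bor_assoc_nonneg {a b c : Int} (ha : 0 ≤ a) (hb : 0 ≤ b) (hc : 0 ≤ c) :
    PySem.Int.bor (PySem.Int.bor a b) c = PySem.Int.bor a (PySem.Int.bor b c) := by
  rw [PySem.Int.bor_of_nonneg ha hb, PySem.Int.bor_of_nonneg hb hc,
    PySem.Int.bor_of_nonneg (Int.natCast_nonneg _) hc,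
    PySem.Int.bor_of_nonneg ha (Int.natCast_nonneg _),
    Int.toNat_natCast, Int.toNat_natCast, Nat.lor_assoc]

lemma gLoop_nonneg (l : List Int) (x acc : Int) (hl : ∀ p ∈ l, 0 ≤ p) (hacc : 0 ≤ acc) :
    0 ≤ gLoop l x acc := by
  induction l generalizing x acc with
  | nil => exact hacc
  | cons p ps ih =>
    refine ih _ _ (fun q hq => hl q (List.mem_cons_of_mem _ hq)) ?_
    split
    · exact bor_nonneg hacc (hl p (List.mem_cons_self))
    · exact hacc

lemma gLoop_acc (l : List Int) (x acc : Int) (hl : ∀ p ∈ l, 0 ≤ p) (hacc : 0 ≤ acc) :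
    gLoop l x acc = PySem.Int.bor acc (gLoop l x 0) := by
  induction l generalizing x acc with
  | nil => simp [gLoop, PySem.Int.bor_zero]
  | cons p ps ih =>
    have hp : 0 ≤ p := hl p List.mem_cons_self
    have hps : ∀ q ∈ ps, 0 ≤ q := fun q hq => hl q (List.mem_cons_of_mem _ hq)
    have hG : 0 ≤ gLoop ps (PySem.Int.floordiv x 2) 0 := gLoop_nonneg _ _ _ hps le_rfl
    simp only [gLoop]
    split
    · rw [ih _ _ hps (bor_nonneg hacc hp), ih _ _ hps (bor_nonneg le_rfl hp),
        PySem.Int.bor_comm 0 p, PySem.Int.bor_zero, bor_assoc_nonneg hacc hp hG]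
    · rw [ih _ _ hps hacc]

lemma gLoop_append (l1 l2 : List Int) (x acc : Int) :
    gLoop (l1 ++ l2) x acc =
      gLoop l2 (PySem.Int.floordiv x ((2 : Int) ^ l1.length)) (gLoop l1 x acc) := by
  induction l1 generalizing x acc with
  | nil =>
    simp only [List.nil_append, gLoop, List.length_nil, pow_zero,
      PySem.Int.floordiv_eq_ediv_of_pos (by norm_num : (0:Int) < 1), Int.ediv_one]
  | cons p ps ih =>
    simp only [List.cons_append, gLoop, ih, List.length_cons]
    congr 1
    have h1 : (0:Int) < 2 := by norm_num
    have hn : (0:Int) < 2 ^ ps.length := by positivity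
    have hn1 : (0:Int) < 2 ^ (ps.length + 1) := by positivity
    rw [PySem.Int.floordiv_eq_ediv_of_pos h1, PySem.Int.floordiv_eq_ediv_of_pos hn,
      PySem.Int.floordiv_eq_ediv_of_pos hn1,
      Int.ediv_ediv_eq_ediv_mul (by norm_num : (0:Int) ≤ 2)]
    ring_nf

-- digit condition: 'x & 1 != 0' is 'x % 2 = 1'
lemma band_one_ne (x : Int) : (PySem.Int.band x 1 ≠ 0) ↔ x % 2 = 1 := by
  rw [PySem.Int.band_one, PySem.Int.mod_eq_emod_of_pos (by norm_num)]
  omega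

-- Python 'y & 255' is 'y % 256' (two's complement, exact on negatives as well).
lemma band_255 (y : Int) : PySem.Int.band y 255 = y % 256 := by
  by_cases hy : 0 ≤ y
  · rw [PySem.Int.band_of_nonneg hy (by norm_num)]
    have h255n : (255 : Int).toNat = 255 := rfl
    have hm : y.toNat &&& 255 = y.toNat % 256 := by
      rw [(by norm_num : (255:Nat) = 2 ^ 8 - 1), Nat.and_two_pow_sub_one_eq_mod]
    rw [h255n, hm]
    omega
  · have h255 : (0:Int) ≤ 255 := by norm_num
    simp only [PySem.Int.band, if_neg hy, if_pos h255]
    have h255n : (255 : Int).toNat = 255 := rfl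
    have hm : 255 &&& (-y - 1).toNat = (-y - 1).toNat % 256 := by
      rw [Nat.land_comm, (by norm_num : (255:Nat) = 2 ^ 8 - 1), Nat.and_two_pow_sub_one_eq_mod]
    rw [h255n, hm]
    omega

-- one halving step under a modulus
lemma emod_pow_ediv_two (y : Int) (n : Nat) :
    y % 2 ^ (n + 1) / 2 = y / 2 % 2 ^ n := by
  have hn : (0:Int) < 2 ^ n := by positivity
  have hsplit : (2:Int) ^ (n + 1) = 2 ^ n * 2 := by ring
  have hk : y % (2 ^ n * 2) = y - 2 ^ n * 2 * (y / (2 ^ n * 2)) := Int.emod_def y _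
  have hdd : y / 2 / 2 ^ n = y / (2 ^ n * 2) := by
    rw [Int.ediv_ediv_eq_ediv_mul (by norm_num : (0:Int) ≤ 2)]; ring_nf
  have h2 : (y - 2 ^ n * 2 * (y / (2 ^ n * 2))) / 2 = y / 2 - 2 ^ n * (y / (2 ^ n * 2)) := by
    have := Int.add_mul_ediv_right y (-(2 ^ n * (y / (2 ^ n * 2)))) (by norm_num : (2:Int) ≠ 0)
    calc (y - 2 ^ n * 2 * (y / (2 ^ n * 2))) / 2
        = (y + -(2 ^ n * (y / (2 ^ n * 2))) * 2) / 2 := by ring_nf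
      _ = y / 2 + -(2 ^ n * (y / (2 ^ n * 2))) := this
      _ = y / 2 - 2 ^ n * (y / (2 ^ n * 2)) := by ring
  have hm : y / 2 % 2 ^ n = y / 2 - 2 ^ n * (y / 2 / 2 ^ n) := Int.emod_def _ _
  rw [hsplit, hk, h2, hm, hdd]

-- gLoop over a list of length ≤ n only reads the low n bits of x
lemma gLoop_emod (l : List Int) (n : Nat) (x acc : Int) (hl : l.length ≤ n) :
    gLoop l (x % 2 ^ n) acc = gLoop l x acc := by
  induction l generalizing n x acc with
  | nil => rfl
  | cons p ps ih =>
    obtain ⟨m, rfl⟩ : ∃ m, n = m + 1 := by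
      cases n with
      | zero => simp at hl
      | succ m => exact ⟨m, rfl⟩
    have hps : ps.length ≤ m := by simpa using hl
    have hdig : PySem.Int.band (x % 2 ^ (m + 1)) 1 ≠ 0 ↔ PySem.Int.band x 1 ≠ 0 := by
      rw [band_one_ne, band_one_ne,
        Int.emod_emod_of_dvd x (by exact dvd_pow_self 2 (Nat.succ_ne_zero m))]
    have hdiv : PySem.Int.floordiv (x % 2 ^ (m + 1)) 2 = (x / 2) % 2 ^ m := by
      rw [PySem.Int.floordiv_eq_ediv_of_pos (by norm_num : (0:Int) < 2), emod_pow_ediv_two]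
    simp only [gLoop]
    rw [hdiv]
    by_cases hc : PySem.Int.band x 1 ≠ 0
    · rw [if_pos (hdig.mpr hc), if_pos hc]
      rw [ih m _ _ hps, PySem.Int.floordiv_eq_ediv_of_pos (by norm_num : (0:Int) < 2)]
    · rw [if_neg (by simpa [hdig] using hc), if_neg hc]
      rw [ih m _ _ hps, PySem.Int.floordiv_eq_ediv_of_pos (by norm_num : (0:Int) < 2)]

-- B's inner 8-bit table-building fold is gLoop on the listed entries
lemma fold_bits_eq_gLoop (f : Nat → Int) (n : Nat) (y acc : Int) :
    (List.range n).foldl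
      (fun e j => if PySem.Int.band (PySem.Int.floordiv y ((2 : Int) ^ j)) 1 ≠ 0
        then PySem.Int.bor e (f j) else e) acc
    = gLoop ((List.range n).map f) y acc := by
  induction n generalizing acc with
  | zero => rfl
  | succ m ih =>
    rw [List.range_succ, List.foldl_append, List.map_append, gLoop_append, ih]
    simp [gLoop]

-- the four byte chunks of PBOX
def pchunk (k : Nat) : List Int := (List.range 8).map (fun j => PBOX.getD (8 * k + j) 0)

lemma pchunk_nonneg (k : Nat) : ∀ p ∈ pchunk k, 0 ≤ p := by
  intro p hp
  simp only [pchunk, List.mem_map] at hp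
  obtain ⟨j, _, rfl⟩ := hp
  by_cases h : 8 * k + j < PBOX.length
  · rw [List.getD_eq_getElem _ _ h]
    have hall : ∀ p ∈ PBOX, 0 ≤ p := by decide
    exact hall _ (List.getElem_mem h)
  · rw [List.getD_eq_default _ _ (le_of_not_gt h)]

-- a table lookup at byte 'y & 255' equals gLoop of the corresponding PBOX chunk at y
set_option maxRecDepth 4096 in
lemma lookup_eq_gLoop (k : Nat) (hk : k < 4) (y : Int) :
    PySem.List.pyGetD (pboxTables.getD k []) (PySem.Int.band y 255) 0 = gLoop (pchunk k) y 0 := by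
  have hb : PySem.Int.band y 255 = y % 256 := band_255 y
  have h0 : (0:Int) ≤ y % 256 := Int.emod_nonneg y (by norm_num)
  have h1 : y % 256 < 256 := Int.emod_lt_of_pos y (by norm_num)
  have htbl : pboxTables.getD k [] =
      (List.range 256).map (fun (b : Nat) =>
        (List.range 8).foldl
          (fun e j =>
            if PySem.Int.band (PySem.Int.floordiv ((b : Nat) : Int) ((2 : Int) ^ j)) 1 ≠ 0
            then PySem.Int.bor e (PBOX.getD (8 * k + j) 0) else e) 0) := by
    interval_cases k <;> rfl

  rw [hb, htbl,
    PySem.List.pyGetD_eq_getElem _ _ h0 (by simpa using h1)]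
  rw [List.getElem_map, List.getElem_range, fold_bits_eq_gLoop]
  have hcast : (((y % 256).toNat : Nat) : Int) = y % 256 := Int.toNat_of_nonneg h0
  rw [hcast]
  have h256 : (256 : Int) = 2 ^ 8 := by norm_num
  rw [h256] at *
  exact gLoop_emod _ 8 y 0 (by simp)

lemma pbox_split : PBOX = pchunk 0 ++ (pchunk 1 ++ (pchunk 2 ++ pchunk 3)) := by decide

-- ===== VERDICT (by name: the statement is the Claim_ definition above) =====
theorem ice_perm32_spec : Claim_equal_ice_perm32 := by
  intro x _
  unfold Spec_ice_perm32 ice_perm32 ice_perm32_alt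
  rw [iceLoop_eq_gLoop, pbox_split]
  rw [gLoop_append, gLoop_append, gLoop_append]
  have hlen0 : (pchunk 0).length = 8 := by decide
  have hlen1 : (pchunk 1).length = 8 := by decide
  have hlen2 : (pchunk 2).length = 8 := by decide
  rw [hlen0, hlen1, hlen2]
  have h2 : (0:Int) < 2 ^ 8 := by norm_num
  have e1 : PySem.Int.floordiv x ((2:Int) ^ 8) = x / 256 := by
    rw [PySem.Int.floordiv_eq_ediv_of_pos h2]; norm_num
  have e2 : PySem.Int.floordiv (x / 256) ((2:Int) ^ 8) = x / 65536 := by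
    rw [PySem.Int.floordiv_eq_ediv_of_pos h2]; norm_num; omega
  have e3 : PySem.Int.floordiv (x / 65536) ((2:Int) ^ 8) = x / 16777216 := by
    rw [PySem.Int.floordiv_eq_ediv_of_pos h2]; norm_num; omega
  rw [e1, e2, e3]
  have f1 : PySem.Int.floordiv x 256 = x / 256 :=
    PySem.Int.floordiv_eq_ediv_of_pos (by norm_num)
  have f2 : PySem.Int.floordiv x 65536 = x / 65536 :=
    PySem.Int.floordiv_eq_ediv_of_pos (by norm_num)
  have f3 : PySem.Int.floordiv x 16777216 = x / 16777216 :=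
    PySem.Int.floordiv_eq_ediv_of_pos (by norm_num)
  rw [f1, f2, f3]
  rw [lookup_eq_gLoop 0 (by norm_num), lookup_eq_gLoop 1 (by norm_num),
    lookup_eq_gLoop 2 (by norm_num), lookup_eq_gLoop 3 (by norm_num)]
  have hG0 : 0 ≤ gLoop (pchunk 0) x 0 := gLoop_nonneg _ _ _ (pchunk_nonneg 0) le_rfl
  have hG1 : 0 ≤ gLoop (pchunk 1) (x / 256) 0 := gLoop_nonneg _ _ _ (pchunk_nonneg 1) le_rfl
  have hG2 : 0 ≤ gLoop (pchunk 2) (x / 65536) 0 := gLoop_nonneg _ _ _ (pchunk_nonneg 2) le_rfl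
  rw [gLoop_acc _ _ _ (pchunk_nonneg 1) hG0,
    gLoop_acc _ _ _ (pchunk_nonneg 2) (bor_nonneg hG0 hG1),
    gLoop_acc _ _ _ (pchunk_nonneg 3) (bor_nonneg (bor_nonneg hG0 hG1) hG2)]
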